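-- pv_equiv track=rewrite | github.com/tom-gordon13/im-calendar-alerts | main.py | compare_events
-- ===== SOURCE A (Python) =====
-- def compare_events(new_events, previous_events):
--     """Compare new and previous events for changes in registration status or deadline"""
--     updates = {}
--
--     for event_name, new_event in new_events.items():
--         if event_name in previous_events:
--             prev_event = previous_events[event_name]
--             changes = {}
--
--             # Check registration status
--             if new_event['registrationStatus'] != prev_event['registrationStatus']:
--                 changes['registrationStatus'] = {
--                     'from': prev_event['registrationStatus'],
--                     'to': new_event['registrationStatus']
--                 }
--
--             # Check registration deadline
--             if new_event['registrationDeadline'] != prev_event['registrationDeadline']: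
--                 changes['registrationDeadline'] = {
--                     'from': prev_event['registrationDeadline'],
--                     'to': new_event['registrationDeadline']
--                 }
--
--             if changes:
--                 updates[event_name] = changes
--
--     return updates
-- ===== SOURCE B (Python) =====
-- FIELDS = ('registrationStatus', 'registrationDeadline')
--
--
-- def compare_events(new_events, previous_events):
--     """Compare new and previous events for changes in registration status or deadline."""
--     # Stage 1: the events present on both sides, in new_events order.
--     shared = [(name, ev, previous_events[name])
--               for name, ev in new_events.items() if name in previous_events]
--     # Stage 2: one diff table per tracked field.
--     diffs = {}
--     for field in FIELDS:
--         diffs[field] = {name: {'from': prev[field], 'to': new[field]}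
--                         for name, new, prev in shared if new[field] != prev[field]}
--     # Stage 3: merge the per-field tables back per event.
--     updates = {}
--     for name, _, _ in shared:
--         changes = {f: diffs[f][name] for f in diffs if name in diffs[f]}
--         if changes:
--             updates[name] = changes
--     return updates
-- ===== Notes on version B (the rewrite author's own statement) =====
-- stated objective: alternative
-- what changed: Replaces A's single pass with two inline per-field if-blocks by a staged algorithm: first collect the shared events, then build one diff table per tracked field over them, then merge the per-field tables back per event name; Pre_ additionally excludes association lists with duplicate keys (not representable as Python dicts) and shared events missing a tracked field, where A raises KeyError (so does B).
import Mathlib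
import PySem

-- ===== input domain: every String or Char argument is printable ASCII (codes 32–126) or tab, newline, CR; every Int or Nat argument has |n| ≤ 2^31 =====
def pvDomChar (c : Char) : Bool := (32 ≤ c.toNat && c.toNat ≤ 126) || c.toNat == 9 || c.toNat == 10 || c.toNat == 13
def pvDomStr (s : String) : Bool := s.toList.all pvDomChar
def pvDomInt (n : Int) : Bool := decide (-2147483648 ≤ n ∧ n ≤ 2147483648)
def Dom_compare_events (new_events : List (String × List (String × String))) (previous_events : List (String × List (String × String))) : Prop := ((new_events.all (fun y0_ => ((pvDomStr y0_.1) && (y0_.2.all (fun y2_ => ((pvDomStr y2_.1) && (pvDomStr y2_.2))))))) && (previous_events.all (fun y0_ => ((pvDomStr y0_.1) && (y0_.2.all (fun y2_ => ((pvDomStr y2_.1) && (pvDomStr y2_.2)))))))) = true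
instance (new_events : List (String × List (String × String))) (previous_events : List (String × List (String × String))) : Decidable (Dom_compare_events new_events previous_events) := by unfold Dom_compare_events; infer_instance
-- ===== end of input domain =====

-- B replaces A's single pass with two inline per-field if-blocks by a staged algorithm:
-- collect the shared events, build one diff table per tracked field, then merge the
-- tables back per event (objective: alternative).  Return-value equivalence only.

-- ===== PORT A =====
-- The field lookups new_event[f] / prev_event[f] are ported as getD _ _ "": Pre_ keeps
-- exactly the inputs where those keys are present (Python raises KeyError otherwise).
-- A's changes-dict building: the two if-blocks, in order.
def pvChangesA (nd : PySem.Dict String String) (prev_event : PySem.Dict String String) : PySem.Dict String (List (String × String)) :=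
  let changes : PySem.Dict String (List (String × String)) := PySem.Dict.empty
  let changes :=
    if nd.getD "registrationStatus" "" ≠ prev_event.getD "registrationStatus" "" then
      changes.insert "registrationStatus"
        [("from", prev_event.getD "registrationStatus" ""),
         ("to", nd.getD "registrationStatus" "")]
    else changes
  let changes :=
    if nd.getD "registrationDeadline" "" ≠ prev_event.getD "registrationDeadline" "" then
      changes.insert "registrationDeadline"
        [("from", prev_event.getD "registrationDeadline" ""),
         ("to", nd.getD "registrationDeadline" "")]
    else changes
  changes

-- A's loop body over one (event_name, new_event) pair.
def pvStepA (pd : PySem.Dict String (List (String × String)))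
    (updates : PySem.Dict String (List (String × List (String × String))))
    (nv : String × List (String × String)) :
    PySem.Dict String (List (String × List (String × String))) :=
  if pd.contains nv.1 then
    let prev_event := PySem.Dict.mk (pd.getD nv.1 [])
    let changes := pvChangesA (PySem.Dict.mk nv.2) prev_event
    if changes.items ≠ [] then updates.insert nv.1 changes.items else updates
  else updates

def compare_events (new_events : List (String × List (String × String))) (previous_events : List (String × List (String × String))) : List (String × List (String × List (String × String))) :=
  (new_events.foldl (pvStepA (PySem.Dict.mk previous_events)) PySem.Dict.empty).items

-- ===== PORT B =====
def pvFields : List String := ["registrationStatus", "registrationDeadline"]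

-- Stage 1: the events present on both sides, in new_events order.
def pvShared (new_events : List (String × List (String × String))) (previous_events : List (String × List (String × String))) : List (String × List (String × String) × List (String × String)) :=
  new_events.filterMap (fun nv =>
    if (PySem.Dict.mk previous_events).contains nv.1 then
      some (nv.1, nv.2, (PySem.Dict.mk previous_events).getD nv.1 [])
    else none)

-- Stage 2: the diff table of one field over the shared events.
def pvDiffTable (f : String) (shared : List (String × List (String × String) × List (String × String))) : List (String × List (String × String)) :=
  shared.filterMap (fun t =>
    if (PySem.Dict.mk t.2.1).getD f "" ≠ (PySem.Dict.mk t.2.2).getD f "" then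
      some (t.1, [("from", (PySem.Dict.mk t.2.2).getD f ""), ("to", (PySem.Dict.mk t.2.1).getD f "")])
    else none)

-- Stage 3: merge the per-field tables back per event.
def pvChangesB (diffs : List (String × List (String × List (String × String))))
    (t : String × List (String × String) × List (String × String)) :
    List (String × List (String × String)) :=
  diffs.filterMap (fun fd =>
    if (PySem.Dict.mk fd.2).contains t.1 then
      some (fd.1, (PySem.Dict.mk fd.2).getD t.1 [])
    else none)

def pvMergeStep (diffs : List (String × List (String × List (String × String))))
    (updates : PySem.Dict String (List (String × List (String × String))))
    (t : String × List (String × String) × List (String × String)) :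
    PySem.Dict String (List (String × List (String × String))) :=
  let changes := pvChangesB diffs t
  if changes ≠ [] then updates.insert t.1 changes else updates

def compare_events_alt (new_events : List (String × List (String × String))) (previous_events : List (String × List (String × String))) : List (String × List (String × List (String × String))) :=
  let shared := pvShared new_events previous_events
  let diffs := pvFields.map (fun f => (f, pvDiffTable f shared))
  (shared.foldl (pvMergeStep diffs) PySem.Dict.empty).items

-- ===== PRECONDITION & SPEC =====
def pvFieldsOk (ev : List (String × String)) : Bool :=
  (PySem.Dict.mk ev).contains "registrationStatus" && (PySem.Dict.mk ev).contains "registrationDeadline"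

-- Pre_ excludes (a) association lists with duplicate keys at either level — those are not
-- representable as Python dict arguments (a Python dict would have collapsed them) — and
-- (b) shared events where either side lacks a tracked field, on which A raises KeyError
-- (B raises KeyError there too).
def Pre_compare_events (new_events : List (String × List (String × String))) (previous_events : List (String × List (String × String))) : Prop :=
  (new_events.map Prod.fst).Nodup ∧
  (previous_events.map Prod.fst).Nodup ∧
  (∀ p ∈ new_events, (p.2.map Prod.fst).Nodup) ∧
  (∀ p ∈ previous_events, (p.2.map Prod.fst).Nodup) ∧
  (∀ p ∈ new_events,
    ((PySem.Dict.mk previous_events).get? p.1).all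
      (fun q => pvFieldsOk p.2 && pvFieldsOk q) = true)
instance (new_events : List (String × List (String × String))) (previous_events : List (String × List (String × String))) : Decidable (Pre_compare_events new_events previous_events) := by unfold Pre_compare_events; infer_instance

def pvWitness_compare_events : (List (String × List (String × String))) × (List (String × List (String × String))) :=
  ([("hack", [("registrationStatus", "open"), ("registrationDeadline", "May 1")])],
   [("hack", [("registrationStatus", "closed"), ("registrationDeadline", "May 1")])])

def Spec_compare_events (new_events : List (String × List (String × String))) (previous_events : List (String × List (String × String))) (out : List (String × List (String × List (String × String)))) : Prop := out = compare_events_alt new_events previous_events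
instance (new_events : List (String × List (String × String))) (previous_events : List (String × List (String × String))) (out : List (String × List (String × List (String × String)))) : Decidable (Spec_compare_events new_events previous_events out) := by unfold Spec_compare_events; infer_instance

-- ===== CLAIM (what is proved, stated in full; the proofs are below) =====
def Claim_equal_compare_events : Prop := ∀ (new_events : List (String × List (String × String))) (previous_events : List (String × List (String × String))), Dom_compare_events new_events previous_events → Pre_compare_events new_events previous_events → Spec_compare_events new_events previous_events (compare_events new_events previous_events)

-- ===== LEMMAS AND PROOFS =====

-- The two-field change record of one shared event, as one list.
def pvFieldDiffs (ne pe : List (String × String)) : List (String × List (String × String)) :=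
  pvFields.filterMap (fun f =>
    if (PySem.Dict.mk ne).getD f "" ≠ (PySem.Dict.mk pe).getD f "" then
      some (f, [("from", (PySem.Dict.mk pe).getD f ""), ("to", (PySem.Dict.mk ne).getD f "")])
    else none)

-- A's two if-blocks build exactly the two-field filterMap.
lemma changesA_items_eq (nd prev : List (String × String)) :
    (pvChangesA (PySem.Dict.mk nd) (PySem.Dict.mk prev)).items = pvFieldDiffs nd prev := by
  simp only [pvChangesA, pvFieldDiffs, pvFields, List.filterMap]
  split_ifs <;> simp [PySem.Dict.insert, PySem.Dict.empty]

-- Generic: a foldl over fresh distinct keys that conditionally inserts appends its outputs.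
lemma foldl_insert_opt {α β : Type} (key : α → String) (c : α → Option β)
    (F : PySem.Dict String β → α → PySem.Dict String β)
    (hF : ∀ u a, F u a = (c a).elim u (fun v => u.insert (key a) v)) :
    ∀ (l : List α) (d : PySem.Dict String β), (l.map key).Nodup →
      (∀ a ∈ l, d.contains (key a) = false) →
      (l.foldl F d).items = d.items ++ l.filterMap (fun a => (c a).map (fun v => (key a, v))) := by
  intro l
  induction l with
  | nil => simp
  | cons a rest ih =>
    intro d hnd hfresh
    simp only [List.map_cons, List.nodup_cons] at hnd
    have hfa := hfresh a (List.mem_cons_self ..)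
    have hrest : ∀ p ∈ rest, d.contains (key p) = false :=
      fun p hp => hfresh p (List.mem_cons_of_mem _ hp)
    rw [List.foldl_cons, hF, List.filterMap_cons]
    cases hc : c a with
    | none => simpa using ih d hnd.2 hrest
    | some v =>
      simp only [Option.map_some, Option.elim]
      rw [ih _ hnd.2 (fun p hp => by
        rw [PySem.Dict.contains_insert]
        have hne : key p ≠ key a := fun hh => hnd.1 (hh ▸ List.mem_map_of_mem hp)
        simp [hne, hrest p hp])]
      rw [PySem.Dict.items_insert_of_not_contains _ _ hfa]
      simp

-- A's loop body in the generic shape.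
def pvCA (pe : List (String × List (String × String))) (nv : String × List (String × String)) :
    Option (List (String × List (String × String))) :=
  match (PySem.Dict.mk pe).get? nv.1 with
  | none => none
  | some prev =>
    if pvFieldDiffs nv.2 prev = [] then none else some (pvFieldDiffs nv.2 prev)

lemma stepA_eq (pe : List (String × List (String × String)))
    (u : PySem.Dict String (List (String × List (String × String))))
    (nv : String × List (String × String)) :
    pvStepA (PySem.Dict.mk pe) u nv = (pvCA pe nv).elim u (fun v => u.insert nv.1 v) := by
  cases h : (PySem.Dict.mk pe).get? nv.1 with
  | none => simp [pvStepA, pvCA, PySem.Dict.contains_eq_isSome_get?, h]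
  | some prev =>
    have hgd : (PySem.Dict.mk pe).getD nv.1 [] = prev := by
      simp [PySem.Dict.getD_eq_get?_getD, h]
    simp only [pvStepA, PySem.Dict.contains_eq_isSome_get?, h, Option.isSome_some, if_true, hgd,
      pvCA, changesA_items_eq]
    by_cases he : pvFieldDiffs nv.2 prev = [] <;> simp [he]

-- B's merge body in the generic shape.
def pvCB (diffs : List (String × List (String × List (String × String))))
    (t : String × List (String × String) × List (String × String)) :
    Option (List (String × List (String × String))) :=
  if pvChangesB diffs t = [] then none else some (pvChangesB diffs t)

lemma mergeStep_eq (diffs : List (String × List (String × List (String × String))))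
    (u : PySem.Dict String (List (String × List (String × String))))
    (t : String × List (String × String) × List (String × String)) :
    pvMergeStep diffs u t = (pvCB diffs t).elim u (fun v => u.insert t.1 v) := by
  by_cases he : pvChangesB diffs t = [] <;> simp [pvMergeStep, pvCB, he]

-- keys of the diff table are among the shared keys
lemma diffTable_fst_sublist (f : String) (s : List (String × List (String × String) × List (String × String))) :
    ((pvDiffTable f s).map Prod.fst).Sublist (s.map Prod.fst) := by
  induction s with
  | nil => simp [pvDiffTable]
  | cons h rest ih =>
    simp only [pvDiffTable, List.filterMap_cons, List.map_cons]
    split_ifs with hc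
    · simpa [pvDiffTable] using List.Sublist.cons₂ h.1 (show ((pvDiffTable f rest).map Prod.fst).Sublist (rest.map Prod.fst) from ih)
    · exact List.Sublist.trans (show ((pvDiffTable f rest).map Prod.fst).Sublist (rest.map Prod.fst) from ih) (List.sublist_cons_self _ _)

lemma diffTable_get?_not_mem (f : String) (k : String)
    (s : List (String × List (String × String) × List (String × String)))
    (hk : k ∉ s.map Prod.fst) :
    (PySem.Dict.mk (pvDiffTable f s)).get? k = none := by
  rw [PySem.Dict.get?_eq_none_iff_not_mem_keys]
  intro hmem
  exact hk ((diffTable_fst_sublist f s).mem hmem)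

-- lookup in the per-field diff table of a shared event with distinct keys
lemma diffTable_get? (f : String) :
    ∀ (s : List (String × List (String × String) × List (String × String))),
      (s.map Prod.fst).Nodup → ∀ t ∈ s,
      (PySem.Dict.mk (pvDiffTable f s)).get? t.1 =
        if (PySem.Dict.mk t.2.1).getD f "" ≠ (PySem.Dict.mk t.2.2).getD f "" then
          some [("from", (PySem.Dict.mk t.2.2).getD f ""), ("to", (PySem.Dict.mk t.2.1).getD f "")]
        else none := by
  intro s
  induction s with
  | nil => intro _ t ht; exact absurd ht (List.not_mem_nil)
  | cons h rest ih =>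
    intro hnd t ht
    simp only [List.map_cons, List.nodup_cons] at hnd
    have hunf : pvDiffTable f (h :: rest) =
        if (PySem.Dict.mk h.2.1).getD f "" ≠ (PySem.Dict.mk h.2.2).getD f "" then
          (h.1, [("from", (PySem.Dict.mk h.2.2).getD f ""), ("to", (PySem.Dict.mk h.2.1).getD f "")]) :: pvDiffTable f rest
        else pvDiffTable f rest := by
      simp only [pvDiffTable, List.filterMap_cons]
      split_ifs <;> rfl
    rcases List.mem_cons.mp ht with rfl | htr
    · rw [hunf]
      split_ifs with hc
      · simp [PySem.Dict.get?_mk_cons]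
      · exact diffTable_get?_not_mem f t.1 rest hnd.1
    · have hne : h.1 ≠ t.1 := fun hh => hnd.1 (hh ▸ List.mem_map_of_mem htr)
      have hrec := ih hnd.2 t htr
      rw [hunf]
      by_cases hch : (PySem.Dict.mk h.2.1).getD f "" ≠ (PySem.Dict.mk h.2.2).getD f ""
      · rw [if_pos hch, PySem.Dict.get?_mk_cons]
        simp only [beq_iff_eq, if_neg hne]
        exact hrec
      · rw [if_neg hch]
        exact hrec

-- for a shared event, B's merged change record is exactly the two-field diff list
lemma changes_eq (s : List (String × List (String × String) × List (String × String)))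
    (hnd : (s.map Prod.fst).Nodup) (t : String × List (String × String) × List (String × String))
    (ht : t ∈ s) :
    pvCB (pvFields.map (fun f => (f, pvDiffTable f s))) t =
      (if pvFieldDiffs t.2.1 t.2.2 = [] then none else some (pvFieldDiffs t.2.1 t.2.2)) := by
  have hmap : pvChangesB (pvFields.map (fun f => (f, pvDiffTable f s))) t = pvFieldDiffs t.2.1 t.2.2 := by
    rw [pvChangesB, List.filterMap_map, pvFieldDiffs]
    apply List.filterMap_congr
    intro f _
    have hg := diffTable_get? f s hnd t ht
    simp only [Function.comp]
    rw [PySem.Dict.contains_eq_isSome_get?, PySem.Dict.getD_eq_get?_getD, hg]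
    split_ifs <;> simp_all
  simp only [pvCB, hmap]

-- stage 1 as a filterMap through get?
lemma shared_eq (ne pe : List (String × List (String × String))) :
    pvShared ne pe = ne.filterMap (fun nv =>
      ((PySem.Dict.mk pe).get? nv.1).map (fun p => (nv.1, nv.2, p))) := by
  unfold pvShared
  apply List.filterMap_congr
  intro nv _
  rw [PySem.Dict.contains_eq_isSome_get?, PySem.Dict.getD_eq_get?_getD]
  cases h : (PySem.Dict.mk pe).get? nv.1 <;> simp_all

lemma shared_fst_sublist (ne pe : List (String × List (String × String))) :
    ((pvShared ne pe).map Prod.fst).Sublist (ne.map Prod.fst) := by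
  induction ne with
  | nil => simp [pvShared]
  | cons h rest ih =>
    simp only [pvShared, List.filterMap_cons, List.map_cons]
    split_ifs with hc
    · simpa [pvShared] using List.Sublist.cons₂ h.1 (show ((pvShared rest pe).map Prod.fst).Sublist (rest.map Prod.fst) from ih)
    · exact List.Sublist.trans (show ((pvShared rest pe).map Prod.fst).Sublist (rest.map Prod.fst) from ih) (List.sublist_cons_self _ _)

-- ===== VERDICT (by name: the statement is the Claim_ definition above) =====
theorem compare_events_spec : Claim_equal_compare_events := by
  intro ne pe _ hpre
  unfold Spec_compare_events compare_events compare_events_alt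
  have hndS : ((pvShared ne pe).map Prod.fst).Nodup :=
    (shared_fst_sublist ne pe).nodup hpre.1
  rw [foldl_insert_opt Prod.fst (pvCA pe) _ (fun u a => stepA_eq pe u a) ne PySem.Dict.empty
        hpre.1 (fun p _ => PySem.Dict.contains_empty p.1),
      foldl_insert_opt Prod.fst (pvCB (pvFields.map (fun f => (f, pvDiffTable f (pvShared ne pe)))))
        _ (fun u a => mergeStep_eq _ u a) (pvShared ne pe) PySem.Dict.empty
        hndS (fun p _ => PySem.Dict.contains_empty p.1)]
  congr 1
  have hB : (pvShared ne pe).filterMap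
      (fun t => (pvCB (pvFields.map (fun f => (f, pvDiffTable f (pvShared ne pe)))) t).map
        (fun v => (t.1, v))) =
      (pvShared ne pe).filterMap (fun t =>
        (if pvFieldDiffs t.2.1 t.2.2 = [] then none else some (pvFieldDiffs t.2.1 t.2.2)).map
          (fun v => (t.1, v))) := by
    apply List.filterMap_congr
    intro t ht
    rw [changes_eq (pvShared ne pe) hndS t ht]
  rw [hB]
  conv_rhs => rw [shared_eq ne pe]
  rw [List.filterMap_filterMap]
  apply List.filterMap_congr
  intro nv _
  cases h : (PySem.Dict.mk pe).get? nv.1 with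
  | none => simp [pvCA, h]
  | some prev =>
    by_cases he : pvFieldDiffs nv.2 prev = [] <;> simp [pvCA, h, he]
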